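-- pv_equiv track=rewrite | github.com/RShoose/numpy_tests | Unit_3/task_1_deque.py | process_clients
-- ===== SOURCE A (Python) =====
-- from collections import deque
--
-- def process_clients(clients):
--     queue = deque()
--     for index, client in enumerate(clients, 1):
--         if index % 2 == 0:
--             # Индекс четный, добавляем в начало очереди
--             queue.appendleft(client)
--         else:
--             # Индекс нечетный, добавляем в конец очереди
--             queue.append(client)
--     return list(queue)
-- ===== SOURCE B (Python) =====
-- def process_clients(clients):
--     # Walk the input two at a time: odd (1-based) positions go to the back
--     # in order, even positions are collected and reversed once to form the
--     # front; no deque and no per-element parity branch.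
--     items = list(clients)
--     front, back = [], []
--     i = 0
--     while i + 1 < len(items):
--         back.append(items[i])
--         front.append(items[i + 1])
--         i += 2
--     front.reverse()
--     return front + back + items[i:]
-- ===== Notes on version B (the rewrite author's own statement) =====
-- stated objective: alternative
-- what changed: Replaces the deque with its per-element parity branch (append/appendleft) by a pairwise walk that collects odd- and even-positioned items into two plain lists in one two-step loop, reverses the front once, and concatenates.
import Mathlib
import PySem

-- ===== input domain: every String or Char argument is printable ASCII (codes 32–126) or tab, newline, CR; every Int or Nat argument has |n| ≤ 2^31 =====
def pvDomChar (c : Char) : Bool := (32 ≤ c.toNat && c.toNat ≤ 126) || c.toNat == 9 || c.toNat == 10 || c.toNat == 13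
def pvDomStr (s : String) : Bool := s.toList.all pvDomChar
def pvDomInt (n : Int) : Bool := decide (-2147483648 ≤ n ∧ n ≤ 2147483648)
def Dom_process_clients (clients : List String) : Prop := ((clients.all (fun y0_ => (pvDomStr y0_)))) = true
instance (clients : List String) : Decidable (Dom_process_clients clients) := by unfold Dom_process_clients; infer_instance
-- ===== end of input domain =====

-- B replaces A's deque with its per-element parity branch by a pairwise two-step
-- walk building two plain lists, reversing the front once (objective: alternative).

-- ===== PORT A =====
-- deque modelled as a List: appendleft = cons, append = ++ [x];
-- enumerate(clients, 1) carried as the Int index in the fold state.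
def process_clients (clients : List String) : List String :=
  (clients.foldl
    (fun (st : List String × Int) client =>
      let queue := st.1
      let index := st.2
      if index % 2 == 0 then (client :: queue, index + 1)
      else (queue ++ [client], index + 1))
    ([], 1)).1

-- ===== PORT B =====
-- the index-stepping while loop (i += 2, reading items[i], items[i+1], leftover
-- items[i:]) ported exactly as the two-at-a-time recursion over the list
def pvCollect : List String → List String × List String × List String
  | a :: b :: rest =>
      let (back, front, left) := pvCollect rest
      (a :: back, b :: front, left)
  | rest => ([], [], rest)

def process_clients_alt (clients : List String) : List String :=
  let items := clients
  let (back, front, left) := pvCollect items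
  front.reverse ++ back ++ left

-- ===== PRECONDITION & SPEC =====
def Spec_process_clients (clients : List String) (out : List String) : Prop := out = process_clients_alt clients
instance (clients : List String) (out : List String) : Decidable (Spec_process_clients clients out) := by unfold Spec_process_clients; infer_instance

-- ===== CLAIM (what is proved, stated in full; the proofs are below) =====
def Claim_equal_process_clients : Prop := ∀ (clients : List String), Dom_process_clients clients → Spec_process_clients clients (process_clients clients)

-- ===== LEMMAS AND PROOFS =====

-- A's fold from any queue q and any odd index i yields front.reverse ++ q ++ back ++ left
lemma pvFold_eq : ∀ (xs q : List String) (i : Int), i % 2 = 1 →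
    (xs.foldl
      (fun (st : List String × Int) client =>
        let queue := st.1
        let index := st.2
        if index % 2 == 0 then (client :: queue, index + 1)
        else (queue ++ [client], index + 1))
      (q, i)).1
    = (pvCollect xs).2.1.reverse ++ q ++ (pvCollect xs).1 ++ (pvCollect xs).2.2
  | [], q, i, h => by simp [pvCollect]
  | [a], q, i, h => by
      have h0 : (i % 2 == 0) = false := by simp; omega
      simp [pvCollect, List.foldl, h0]
  | a :: b :: rest, q, i, h => by
      have h0 : (i % 2 == 0) = false := by simp; omega
      have h1 : ((i + 1) % 2 == 0) = true := by simp; omega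
      have ih := pvFold_eq rest (b :: (q ++ [a])) (i + 2) (by omega)
      simp only [List.foldl, h0, h1, if_true, if_false, Bool.false_eq_true]
      rw [show i + 1 + 1 = i + 2 from by ring] at *
      rw [ih]
      simp [pvCollect]

-- ===== VERDICT (by name: the statement is the Claim_ definition above) =====
theorem process_clients_spec : Claim_equal_process_clients := by
  intro clients _
  unfold Spec_process_clients process_clients process_clients_alt
  rw [pvFold_eq clients [] 1 (by decide)]
  simp
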